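-- pv_equiv track=rewrite | github.com/priyamehta2772/cracking-the-coding-interview | Moderate/16.20_cellphone.py | create_memset
-- ===== SOURCE A (Python) =====
-- def create_memset(words):
--     keys = list('abcdefghijklmnopqrstuvwxyz')
--     values = [2,2,2,3,3,3,4,4,4,5,5,5,6,6,6,7,7,7,7,8,8,8,9,9,9,9]
--     letter_to_digit = dict(zip(keys, values))
--     def get_num_seq(word):
--         return int("".join(str(letter_to_digit[i]) for i in list(word)))
--     memset = dict()
--     for w in words:
--     	seq = get_num_seq(w)
--     	if seq in memset:
--     		memset[seq].append(w)
--     	else: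
--     		memset[seq] = [w]
--     return memset
-- ===== SOURCE B (Python) =====
-- def create_memset(words):
--     keys = 'abcdefghijklmnopqrstuvwxyz'
--     values = [2,2,2,3,3,3,4,4,4,5,5,5,6,6,6,7,7,7,7,8,8,8,9,9,9,9]
--     letter_to_digit = dict(zip(keys, values))
--     def get_num_seq(word):
--         return int("".join(str(letter_to_digit[c]) for c in word))
--     pairs = [(get_num_seq(w), w) for w in words]
--     return {s: [w for t, w in pairs if t == s]
--             for s in dict.fromkeys(s for s, _ in pairs)}
-- ===== Notes on version B (the rewrite author's own statement) =====
-- stated objective: alternative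
-- what changed: Replaces A's incremental if/else dict-mutation loop with a pure two-phase construction: precompute all (seq, word) pairs in one pass, dedup the sequences with dict.fromkeys, and build each group by a gather comprehension over the pairs.
import Mathlib
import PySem

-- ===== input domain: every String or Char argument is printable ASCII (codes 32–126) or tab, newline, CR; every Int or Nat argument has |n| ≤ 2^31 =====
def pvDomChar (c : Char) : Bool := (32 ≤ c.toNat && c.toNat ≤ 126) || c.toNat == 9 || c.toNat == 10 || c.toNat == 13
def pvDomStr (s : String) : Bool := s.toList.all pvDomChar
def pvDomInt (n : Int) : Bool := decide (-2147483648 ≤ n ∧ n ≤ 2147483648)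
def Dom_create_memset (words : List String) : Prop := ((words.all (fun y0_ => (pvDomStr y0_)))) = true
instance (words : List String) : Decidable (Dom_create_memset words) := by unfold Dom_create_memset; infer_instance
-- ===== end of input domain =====

-- B replaces A's incremental if/else dict-mutation loop with a pure two-phase
-- construction (pair list, dedup of sequences, gather per sequence); same cost class, no speed claim.

-- ===== PORT A =====
-- letter_to_digit = dict(zip(keys, values))
def pvLetterToDigit : PySem.Dict Char Int :=
  PySem.Dict.ofList (("abcdefghijklmnopqrstuvwxyz".toList).zip
    [2,2,2,3,3,3,4,4,4,5,5,5,6,6,6,7,7,7,7,8,8,8,9,9,9,9])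

-- get_num_seq(word) = int("".join(str(letter_to_digit[i]) for i in list(word)));
-- none = the Python KeyError (bad char) or ValueError (int of the empty join). Shared by both
-- ports: Source B's inner get_num_seq is textually the same code as A's.
def pvGetNumSeq (w : String) : Option Int :=
  match w.toList.mapM (fun c => (pvLetterToDigit.get? c).map (fun d => PySem.Int.toChars d)) with
  | none => none
  | some parts => PySem.Int.ofChars? parts.flatten

-- the for-loop over words: if seq in memset: memset[seq].append(w) else memset[seq] = [w]
def pvMemsetLoop : List String → PySem.Dict Int (List String) → Option (PySem.Dict Int (List String))
  | [], d => some d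
  | w :: rest, d =>
    match pvGetNumSeq w with
    | none => none
    | some seq =>
      if d.contains seq then pvMemsetLoop rest (d.insert seq (d.getD seq [] ++ [w]))
      else pvMemsetLoop rest (d.insert seq [w])

def create_memset (words : List String) : List (Int × List String) :=
  ((pvMemsetLoop words PySem.Dict.empty).getD PySem.Dict.empty).items

-- ===== PORT B =====
-- pairs = [(get_num_seq(w), w) for w in words]   (none = the comprehension raises)
def pvPairs (words : List String) : Option (List (Int × String)) :=
  words.mapM (fun w => (pvGetNumSeq w).map (fun s => (s, w)))

-- {s: [w for t, w in pairs if t == s] for s in dict.fromkeys(s for s, _ in pairs)}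
def create_memset_alt (words : List String) : List (Int × List String) :=
  match pvPairs words with
  | none => []
  | some pairs =>
    (PySem.List.dedup (pairs.map (fun p => p.1))).map
      (fun s => (s, (pairs.filter (fun p => p.1 == s)).map (fun p => p.2)))

-- ===== PRECONDITION & SPEC =====
-- Pre_ excludes exactly the inputs where the Python A raises: an empty word (ValueError from
-- int("")) or a character outside 'a'..'z' (KeyError in letter_to_digit).
def Pre_create_memset (words : List String) : Prop :=
  (words.all (fun w => !w.toList.isEmpty && w.toList.all (fun c => 'a' ≤ c && c ≤ 'z'))) = true
instance (words : List String) : Decidable (Pre_create_memset words) := by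
  unfold Pre_create_memset; infer_instance

def pvWitness_create_memset : List String := ["used", "uses", "cell", "tree", "used"]

def Spec_create_memset (words : List String) (out : List (Int × List String)) : Prop :=
  out = create_memset_alt words
instance (words : List String) (out : List (Int × List String)) :
    Decidable (Spec_create_memset words out) := by unfold Spec_create_memset; infer_instance

-- ===== CLAIM (what is proved, stated in full; the proofs are below) =====
def Claim_equal_create_memset : Prop := ∀ (words : List String), Dom_create_memset words →
  Pre_create_memset words → Spec_create_memset words (create_memset words)

-- ===== LEMMAS AND PROOFS =====

-- A's loop is the fold of a per-pair modify-append over the pair list B precomputes.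
theorem pvMemsetLoop_eq_fold (ws : List String) (d : PySem.Dict Int (List String)) :
    pvMemsetLoop ws d = (pvPairs ws).map
      (fun pairs => pairs.foldl (fun d p => d.modify p.1 [] (fun v => v ++ [p.2])) d) := by
  induction ws generalizing d with
  | nil => rfl
  | cons w rest ih =>
    cases h : pvGetNumSeq w with
    | none => simp [pvMemsetLoop, pvPairs, List.mapM_cons, h]
    | some s =>
      have hstep : (if d.contains s = true then pvMemsetLoop rest (d.insert s (d.getD s [] ++ [w]))
          else pvMemsetLoop rest (d.insert s [w]))
          = pvMemsetLoop rest (d.modify s [] (fun v => v ++ [w])) := by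
        by_cases hc : d.contains s
        · simp [hc, PySem.Dict.modify]
        · simp only [Bool.not_eq_true] at hc
          simp [hc, PySem.Dict.modify, PySem.Dict.getD_of_not_contains d [] hc]
      simp only [pvMemsetLoop, h]
      rw [hstep, ih]
      simp only [pvPairs, List.mapM_cons, h]
      cases hp : rest.mapM (fun w => (pvGetNumSeq w).map (fun s => (s, w))) with
      | none => simp
      | some ps => simp

-- ===== VERDICT (by name: the statement is the Claim_ definition above) =====
theorem create_memset_spec : Claim_equal_create_memset := by
  intro words _ _
  unfold Spec_create_memset create_memset create_memset_alt
  rw [pvMemsetLoop_eq_fold]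
  cases h : pvPairs words with
  | none => rfl
  | some pairs =>
    simp only [Option.map_some, Option.getD_some]
    have hnd : (pairs.foldl (fun d p => d.modify p.1 [] (fun v => v ++ [p.2]))
        PySem.Dict.empty).keys.Nodup := by
      exact PySem.Dict.nodup_keys_foldl_modify_key pairs (fun p => p.1) []
        (fun d p => fun v => v ++ [p.2]) PySem.Dict.empty (by simp)
    rw [PySem.Dict.items_eq_map_keys _ hnd []]
    rw [PySem.Dict.keys_foldl_modify_key]
    have hkeys : PySem.Set.update (PySem.Dict.empty : PySem.Dict Int (List String)).keys (pairs.map (fun p => p.1))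
        = PySem.List.dedup (pairs.map (fun p => p.1)) := by
      simp [PySem.List.dedup_eq_ofList]; rfl
    rw [hkeys]
    refine List.map_congr_left (fun s _ => ?_)
    rw [PySem.Dict.getD_foldl_modify_append]
    simp
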